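-- pv_equiv track=rewrite | github.com/YUASDS/official_bot | plugins/StoryTeller/dice.py | calculate_damage_bonus
-- ===== SOURCE A (Python) =====
-- def calculate_damage_bonus(size: int, strength: int) -> str:
--     """
--     根据体型和体质计算伤害加值
--
--     Args:
--         size: 体型值
--         strength: 体质值
--
--     Returns:
--         伤害加值字符串
--     """
--     total = size + strength
--
--     # 使用字典映射范围判断，提高可读性
--     bonus_ranges = [(65, "-2"), (85, "-1"), (125, "0"), (165, "1d4"), (205, "1d6")]
--
--     for threshold, bonus in bonus_ranges:
--         if total < threshold:
--             return bonus
--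
--     # 超过205的情况
--     additional_dice = (total - 205) // 80 + 2
--     return f"{additional_dice}d6"
-- ===== SOURCE B (Python) =====
-- import bisect
--
-- _THRESHOLDS = [65, 85, 125, 165, 205]
-- _BONUSES = ["-2", "-1", "0", "1d4", "1d6"]
--
-- def calculate_damage_bonus(size: int, strength: int) -> str:
--     total = size + strength
--     idx = bisect.bisect_right(_THRESHOLDS, total)
--     if idx < 5:
--         return _BONUSES[idx]
--     return f"{(total - 205) // 80 + 2}d6"
-- ===== Notes on version B (the rewrite author's own statement) =====
-- stated objective: idiomatic
-- what changed: Replaces the linear scan over (threshold, bonus) pairs with a bisect_right binary search into a constant threshold table indexing a parallel bonus table.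
import Mathlib
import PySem

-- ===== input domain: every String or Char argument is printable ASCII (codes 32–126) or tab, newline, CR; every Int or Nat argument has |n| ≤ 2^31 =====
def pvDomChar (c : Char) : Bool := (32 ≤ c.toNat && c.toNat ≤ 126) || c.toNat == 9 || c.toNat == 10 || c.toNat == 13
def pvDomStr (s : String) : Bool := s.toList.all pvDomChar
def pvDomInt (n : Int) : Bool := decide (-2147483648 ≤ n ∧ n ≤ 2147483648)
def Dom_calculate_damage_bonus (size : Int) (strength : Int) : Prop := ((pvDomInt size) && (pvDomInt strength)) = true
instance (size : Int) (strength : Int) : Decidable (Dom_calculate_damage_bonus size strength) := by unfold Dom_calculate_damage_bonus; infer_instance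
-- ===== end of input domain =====

-- ===== PORT A =====
-- B replaces A's linear threshold scan with a bisect_right binary search into parallel tables (idiomatic; same return value).
-- loop 'for threshold, bonus in bonus_ranges: if total < threshold: return bonus' as structural recursion
def pvLoopA : List (Int × String) → Int → Option String
  | [], _ => none
  | (th, b) :: rest, total => if total < th then some b else pvLoopA rest total

def calculate_damage_bonus (size : Int) (strength : Int) : String :=
  let total := size + strength
  match pvLoopA [(65, "-2"), (85, "-1"), (125, "0"), (165, "1d4"), (205, "1d6")] total with
  | some b => b
  | none => PySem.Int.toStr (PySem.Int.floordiv (total - 205) 80 + 2) ++ "d6"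

-- ===== PORT B =====
-- literal port of bisect.bisect_right's lo/hi loop (indices always in range on a sorted 5-element table)
def pvBisectRightGo (a : List Int) (x : Int) (lo hi : Nat) : Nat :=
  if lo < hi then
    let mid := (lo + hi) / 2
    if x < a.getD mid 0 then pvBisectRightGo a x lo mid
    else pvBisectRightGo a x (mid + 1) hi
  else lo
  termination_by hi - lo
  decreasing_by all_goals omega

def calculate_damage_bonus_alt (size : Int) (strength : Int) : String :=
  let total := size + strength
  let idx := pvBisectRightGo [65, 85, 125, 165, 205] total 0 5
  if idx < 5 then ["-2", "-1", "0", "1d4", "1d6"].getD idx ""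
  else PySem.Int.toStr (PySem.Int.floordiv (total - 205) 80 + 2) ++ "d6"

-- ===== PRECONDITION & SPEC =====
def Spec_calculate_damage_bonus (size : Int) (strength : Int) (out : String) : Prop := out = calculate_damage_bonus_alt size strength
instance (size : Int) (strength : Int) (out : String) : Decidable (Spec_calculate_damage_bonus size strength out) := by unfold Spec_calculate_damage_bonus; infer_instance

-- ===== CLAIM (what is proved, stated in full; the proofs are below) =====
def Claim_equal_calculate_damage_bonus : Prop := ∀ (size : Int) (strength : Int), Dom_calculate_damage_bonus size strength → Spec_calculate_damage_bonus size strength (calculate_damage_bonus size strength)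

-- ===== LEMMAS AND PROOFS =====
-- one unfolding step per concrete (lo,hi) call of the binary search on the constant table
lemma go55 (t : Int) : pvBisectRightGo [65, 85, 125, 165, 205] t 5 5 = 5 := by rw [pvBisectRightGo]; norm_num
lemma go44 (t : Int) : pvBisectRightGo [65, 85, 125, 165, 205] t 4 4 = 4 := by rw [pvBisectRightGo]; norm_num
lemma go33 (t : Int) : pvBisectRightGo [65, 85, 125, 165, 205] t 3 3 = 3 := by rw [pvBisectRightGo]; norm_num
lemma go22 (t : Int) : pvBisectRightGo [65, 85, 125, 165, 205] t 2 2 = 2 := by rw [pvBisectRightGo]; norm_num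
lemma go11 (t : Int) : pvBisectRightGo [65, 85, 125, 165, 205] t 1 1 = 1 := by rw [pvBisectRightGo]; norm_num
lemma go00 (t : Int) : pvBisectRightGo [65, 85, 125, 165, 205] t 0 0 = 0 := by rw [pvBisectRightGo]; norm_num
lemma go34 (t : Int) : pvBisectRightGo [65, 85, 125, 165, 205] t 3 4 = if t < 165 then 3 else 4 := by
  rw [pvBisectRightGo]; norm_num [go33, go44]
lemma go35 (t : Int) : pvBisectRightGo [65, 85, 125, 165, 205] t 3 5 = if t < 205 then (if t < 165 then 3 else 4) else 5 := by
  rw [pvBisectRightGo]; norm_num [go34, go55]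
lemma go01 (t : Int) : pvBisectRightGo [65, 85, 125, 165, 205] t 0 1 = if t < 65 then 0 else 1 := by
  rw [pvBisectRightGo]; norm_num [go00, go11]
lemma go02 (t : Int) : pvBisectRightGo [65, 85, 125, 165, 205] t 0 2 = if t < 85 then (if t < 65 then 0 else 1) else 2 := by
  rw [pvBisectRightGo]; norm_num [go01, go22]
lemma bisect_eval (t : Int) : pvBisectRightGo [65, 85, 125, 165, 205] t 0 5 =
    if t < 65 then 0 else if t < 85 then 1 else if t < 125 then 2
    else if t < 165 then 3 else if t < 205 then 4 else 5 := by
  rw [pvBisectRightGo]; norm_num [go02, go35]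
  split_ifs <;> omega

-- ===== VERDICT (by name: the statement is the Claim_ definition above) =====
theorem calculate_damage_bonus_spec : Claim_equal_calculate_damage_bonus := by
  intro size strength _
  unfold Spec_calculate_damage_bonus calculate_damage_bonus calculate_damage_bonus_alt
  by_cases h1 : size + strength < 65 <;> by_cases h2 : size + strength < 85 <;>
    by_cases h3 : size + strength < 125 <;> by_cases h4 : size + strength < 165 <;>
    by_cases h5 : size + strength < 205 <;>
    simp [pvLoopA, bisect_eval, h1, h2, h3, h4, h5]
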